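-- pv_equiv track=rewrite | github.com/aramisjiang-wq/EmbodiedPulse2026 | taxonomy.py | build_nested_from_flat
-- ===== SOURCE A (Python) =====
-- from typing import Dict, List, Tuple
--
-- UNCATEGORIZED_KEY = "Uncategorized"
--
-- def get_category_from_tag(tag_key: str) -> str:
--     """
--     从标签键提取分类
--
--     Args:
--         tag_key: 标签键（格式：分类/标签）
--
--     Returns:
--         分类名称
--     """
--     if '/' in tag_key:
--         return tag_key.split('/')[0]
--     return UNCATEGORIZED_KEY
--
-- def build_nested_from_flat(flat: Dict[str, any]) -> Dict[str, Dict[str, any]]: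
--     """
--     兼容函数：将扁平的标签数据转为按分类嵌套的结构
--
--     Args:
--         flat: {标签键: 值} 的扁平字典
--
--     Returns:
--         {分类: {标签: 值}} 的嵌套字典
--     """
--     nested = {}
--     for tag_key, value in flat.items():
--         category = get_category_from_tag(tag_key)
--         if category not in nested:
--             nested[category] = {}
--         nested[category][tag_key] = value
--     return nested
-- ===== SOURCE B (Python) =====
-- UNCATEGORIZED_KEY = "Uncategorized"
--
-- def get_category_from_tag(tag_key: str) -> str:
--     if '/' in tag_key:
--         return tag_key.split('/')[0]
--     return UNCATEGORIZED_KEY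
--
-- def build_nested_from_flat(flat):
--     # two-pass: list the distinct categories in first-appearance order,
--     # then build each inner dict by one filtered comprehension per category
--     cats = list(dict.fromkeys(get_category_from_tag(k) for k in flat))
--     return {c: {k: v for k, v in flat.items() if get_category_from_tag(k) == c}
--             for c in cats}
-- ===== Notes on version B (the rewrite author's own statement) =====
-- stated objective: alternative
-- what changed: Replaces A's single incremental grouping pass (create-bucket-on-first-sight, then update in place) by a two-pass decomposition: first dedup the category of every key in first-appearance order, then build each category's inner dict with one filtered dict comprehension per category.
import Mathlib
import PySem

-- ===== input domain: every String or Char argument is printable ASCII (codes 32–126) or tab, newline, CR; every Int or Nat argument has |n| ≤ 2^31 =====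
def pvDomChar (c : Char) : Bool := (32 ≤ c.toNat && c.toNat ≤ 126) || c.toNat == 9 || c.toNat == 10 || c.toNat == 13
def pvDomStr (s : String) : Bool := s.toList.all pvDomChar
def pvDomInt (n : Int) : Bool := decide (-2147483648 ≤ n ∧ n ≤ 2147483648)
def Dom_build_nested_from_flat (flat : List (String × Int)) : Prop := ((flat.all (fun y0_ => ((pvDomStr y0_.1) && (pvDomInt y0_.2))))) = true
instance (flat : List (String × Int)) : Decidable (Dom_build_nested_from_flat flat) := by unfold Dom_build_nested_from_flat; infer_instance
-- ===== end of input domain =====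

-- B replaces A's single incremental grouping pass by a two-pass decomposition
-- (distinct categories first, then one filtered dict comprehension per category); objective: alternative.

-- ===== PORT A =====
def UNCATEGORIZED_KEY : String := "Uncategorized"

def get_category_from_tag (tag_key : String) : String :=
  if PySem.Str.isIn "/" tag_key then ((PySem.Str.split? tag_key "/").getD []).headD ""
  else UNCATEGORIZED_KEY
-- split('/') on a nonempty separator always returns a nonempty list, so '[0]' is headD

def build_nested_from_flat (flat : List (String × Int)) : List (String × List (String × Int)) :=
  let nested : PySem.Dict String (PySem.Dict String Int) :=
    flat.foldl (fun nested kv =>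
      let category := get_category_from_tag kv.1
      let nested := if nested.contains category then nested
                    else nested.insert category PySem.Dict.empty
      -- nested[category][tag_key] = value
      nested.insert category ((nested.getD category PySem.Dict.empty).insert kv.1 kv.2))
      PySem.Dict.empty
  nested.items.map (fun p => (p.1, p.2.items))

-- ===== PORT B =====
def build_nested_from_flat_alt (flat : List (String × Int)) : List (String × List (String × Int)) :=
  let cats := PySem.List.dedup (flat.map (fun kv => get_category_from_tag kv.1))
  cats.map (fun c =>
    (c, (flat.foldl (fun d kv =>
           if get_category_from_tag kv.1 == c then d.insert kv.1 kv.2 else d)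
           (PySem.Dict.empty : PySem.Dict String Int)).items))

-- ===== PRECONDITION & SPEC =====
def Spec_build_nested_from_flat (flat : List (String × Int)) (out : List (String × List (String × Int))) : Prop := out = build_nested_from_flat_alt flat
instance (flat : List (String × Int)) (out : List (String × List (String × Int))) : Decidable (Spec_build_nested_from_flat flat out) := by unfold Spec_build_nested_from_flat; infer_instance

-- ===== CLAIM (what is proved, stated in full; the proofs are below) =====
def Claim_equal_build_nested_from_flat : Prop := ∀ (flat : List (String × Int)), Dom_build_nested_from_flat flat → Spec_build_nested_from_flat flat (build_nested_from_flat flat)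

-- ===== LEMMAS AND PROOFS =====

-- B's inner per-category fold
def pvInner (flat : List (String × Int)) (c : String) : PySem.Dict String Int :=
  flat.foldl (fun d kv =>
    if get_category_from_tag kv.1 == c then d.insert kv.1 kv.2 else d)
    PySem.Dict.empty

-- A's accumulating fold
def pvStep (nested : PySem.Dict String (PySem.Dict String Int)) (kv : String × Int) :
    PySem.Dict String (PySem.Dict String Int) :=
  let category := get_category_from_tag kv.1
  let nested := if nested.contains category then nested
                else nested.insert category PySem.Dict.empty
  nested.insert category ((nested.getD category PySem.Dict.empty).insert kv.1 kv.2)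

lemma pvInner_foldl_of_no_cat (flat : List (String × Int)) (c : String)
    (d : PySem.Dict String Int)
    (h : ∀ kv ∈ flat, get_category_from_tag kv.1 ≠ c) :
    flat.foldl (fun d kv =>
      if get_category_from_tag kv.1 == c then d.insert kv.1 kv.2 else d) d = d := by
  induction flat generalizing d with
  | nil => rfl
  | cons kv l ih =>
      simp only [List.foldl_cons]
      rw [if_neg (by simpa using h kv (by simp)), ih]
      intro q hq; exact h q (by simp [hq])

lemma pvInner_empty_of_no_cat (flat : List (String × Int)) (c : String)
    (h : ∀ kv ∈ flat, get_category_from_tag kv.1 ≠ c) :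
    pvInner flat c = PySem.Dict.empty :=
  pvInner_foldl_of_no_cat flat c _ h

lemma pvInner_append (l : List (String × Int)) (p : String × Int) (c : String) :
    pvInner (l ++ [p]) c =
      if get_category_from_tag p.1 == c then (pvInner l c).insert p.1 p.2
      else pvInner l c := by
  simp [pvInner, List.foldl_append]

lemma pvMain (flat : List (String × Int)) :
    (flat.foldl pvStep PySem.Dict.empty).items
      = (PySem.Set.ofList (flat.map (fun kv => get_category_from_tag kv.1))).map
          (fun c => (c, pvInner flat c)) := by
  induction flat using List.reverseRecOn with
  | nil => rfl
  | append_singleton l p ih =>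
      set F := l.foldl pvStep PySem.Dict.empty with hF
      set cats := PySem.Set.ofList (l.map (fun kv => get_category_from_tag kv.1)) with hcats
      set c := get_category_from_tag p.1 with hc
      have hofl : PySem.Set.ofList ((l ++ [p]).map (fun kv => get_category_from_tag kv.1))
          = PySem.Set.add cats c := by
        rw [hcats, hc]; simp [PySem.Set.ofList_eq_foldl, List.foldl_append]
      have hkeys : F.keys = cats := by
        simp [PySem.Dict.keys, ih, Function.comp_def]
      have hnodup : F.keys.Nodup := by rw [hkeys]; exact PySem.Set.nodup_ofList _
      have hfold : (l ++ [p]).foldl pvStep PySem.Dict.empty = pvStep F p := by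
        rw [List.foldl_append]; rfl
      rw [hfold, hofl]
      by_cases hmem : c ∈ cats
      · -- category already present
        have hcont : F.contains c = true := by
          rw [PySem.Dict.contains_eq_decide_mem_keys, hkeys]; simpa using hmem
        have hadd : PySem.Set.add cats c = cats := by
          simp only [PySem.Set.add]
          rw [if_pos (by simpa using hmem)]
        have hgetD : F.getD c PySem.Dict.empty = pvInner l c := by
          exact PySem.Dict.getD_of_mem_items F (by rw [ih]; exact List.mem_map_of_mem hmem) hnodup _
        show (pvStep F p).items = _
        rw [hadd]
        simp only [pvStep, hcont, if_true, ← hc]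
        rw [PySem.Dict.items_insert_of_contains _ _ hcont, hgetD, ih, List.map_map]
        apply List.map_congr_left
        intro a ha
        by_cases hac : a = c
        · subst hac
          simp [pvInner_append, ← hc]
        · simp [pvInner_append, ← hc, hac, Ne.symm hac]
      · -- new category
        have hcont : F.contains c = false := by
          rw [PySem.Dict.contains_eq_decide_mem_keys, hkeys]; simpa using hmem
        have hadd : PySem.Set.add cats c = cats ++ [c] := by
          simp only [PySem.Set.add]
          rw [if_neg (by simpa using hmem)]
        have hnocat : ∀ kv ∈ l, get_category_from_tag kv.1 ≠ c := by
          intro kv hkv heq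
          exact hmem (by rw [hcats, PySem.Set.mem_ofList]; exact heq ▸ List.mem_map_of_mem hkv)
        have hgetD : (F.insert c PySem.Dict.empty).getD c PySem.Dict.empty
            = PySem.Dict.empty := PySem.Dict.getD_insert_self _ _ _ _
        show (pvStep F p).items = _
        rw [hadd]
        simp only [pvStep, hcont, Bool.false_eq_true, if_false, ← hc, hgetD]
        rw [PySem.Dict.items_insert_of_contains _ _ (PySem.Dict.contains_insert_self _ _ _),
            PySem.Dict.items_insert_of_not_contains _ _ hcont, ih]
        rw [List.map_append, List.map_map, List.map_append]
        congr 1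
        · apply List.map_congr_left
          intro a ha
          have hac : a ≠ c := fun h => hmem (h ▸ ha)
          have : (a == c) = false := by simpa using hac
          simp [pvInner_append, ← hc, hac, Ne.symm hac]
        · simp [pvInner_append, ← hc, pvInner_empty_of_no_cat l c hnocat]

-- ===== VERDICT (by name: the statement is the Claim_ definition above) =====
theorem build_nested_from_flat_spec : Claim_equal_build_nested_from_flat := by
  intro flat _
  unfold Spec_build_nested_from_flat build_nested_from_flat build_nested_from_flat_alt
  simp only [PySem.List.dedup_eq_ofList]
  rw [show (fun (nested : PySem.Dict String (PySem.Dict String Int)) (kv : String × Int) =>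
        let category := get_category_from_tag kv.1
        let nested := if nested.contains category then nested
                      else nested.insert category PySem.Dict.empty
        nested.insert category ((nested.getD category PySem.Dict.empty).insert kv.1 kv.2)) = pvStep from rfl]
  rw [pvMain]
  simp [pvInner]
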